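-- pv_equiv track=rewrite | github.com/Roman-/patch_toml | patch_toml.py | split_set_expression
-- ===== SOURCE A (Python) =====
-- from typing import List, Optional, Tuple
--
-- def split_set_expression(s: str) -> Tuple[str, str, Optional[str]]:
--     """
--     Split a --set STRING of the form:
--         path = TOML_VALUE [# inline comment]
--     Return (path, value_src, comment or None).
--     """
--     # Find '=' outside quotes
--     i = 0
--     n = len(s)
--     in_dq = in_sq = False
--     eq_pos = -1
--     while i < n:
--         ch = s[i]
--         if ch == '"' and not in_sq:
--             in_dq = not in_dq
--             i += 1
--             continue
--         if ch == "'" and not in_dq: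
--             in_sq = not in_sq
--             i += 1
--             continue
--         if ch == "=" and not in_dq and not in_sq:
--             eq_pos = i
--             break
--         i += 1
--     if eq_pos == -1:
--         raise ValueError("missing '=' in --set expression")
--
--     path = s[:eq_pos].strip()
--     rhs = s[eq_pos + 1 :].strip()
--     if not path:
--         raise ValueError("empty path before '='")
--
--     # Find '#' not in quotes for inline comment
--     i = 0
--     n = len(rhs)
--     in_dq = in_sq = False
--     hash_pos = -1
--     while i < n:
--         ch = rhs[i]
--         if ch == '"' and not in_sq:
--             in_dq = not in_dq
--             i += 1
--             continue
--         if ch == "'" and not in_dq: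
--             in_sq = not in_sq
--             i += 1
--             continue
--         if ch == "#" and not in_dq and not in_sq:
--             hash_pos = i
--             break
--         i += 1
--
--     if hash_pos != -1:
--         value_src = rhs[:hash_pos].rstrip()
--         comment = rhs[hash_pos + 1 :].strip()
--     else:
--         value_src = rhs
--         comment = None
--
--     if value_src == "":
--         raise ValueError("empty TOML value in --set expression")
--
--     return path, value_src, comment
-- ===== SOURCE B (Python) =====
-- from typing import Optional, Tuple
--
-- def _find_unquoted(s: str, target: str) -> int:
--     """First index of `target` in s outside single/double quotes, or -1.
--     Instead of walking char by char with quote flags, jump with str.find: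
--     locate the earliest of target/'"'/"'", and skip a quoted run wholesale
--     to its matching closing quote."""
--     base = 0
--     while True:
--         cands = [p for p in (s.find(target, base), s.find('"', base), s.find("'", base))
--                  if p != -1]
--         if not cands:
--             return -1
--         j = min(cands)
--         if s[j] == target:
--             return j
--         close = s.find(s[j], j + 1)
--         if close == -1:
--             return -1
--         base = close + 1
--
-- def split_set_expression(s: str) -> Tuple[str, str, Optional[str]]:
--     eq_pos = _find_unquoted(s, "=")
--     if eq_pos == -1:
--         raise ValueError("missing '=' in --set expression")
--     path, rhs = s[:eq_pos].strip(), s[eq_pos + 1:].strip()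
--     if not path:
--         raise ValueError("empty path before '='")
--     hash_pos = _find_unquoted(rhs, "#")
--     value_src, comment = (rhs, None) if hash_pos == -1 else \
--         (rhs[:hash_pos].strip(), rhs[hash_pos + 1:].strip())
--     if not value_src:
--         raise ValueError("empty TOML value in --set expression")
--     return path, value_src, comment
-- ===== Notes on version B (the rewrite author's own statement) =====
-- stated objective: alternative
-- what changed: A walks the string character by character (twice) while toggling in_dq/in_sq quote flags; B keeps no quote-state flags at all: it repeatedly jumps with str.find to the earliest of the target character or either quote character, returns on the target, and skips a quoted run wholesale to its matching closing quote located by another str.find.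
import Mathlib
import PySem

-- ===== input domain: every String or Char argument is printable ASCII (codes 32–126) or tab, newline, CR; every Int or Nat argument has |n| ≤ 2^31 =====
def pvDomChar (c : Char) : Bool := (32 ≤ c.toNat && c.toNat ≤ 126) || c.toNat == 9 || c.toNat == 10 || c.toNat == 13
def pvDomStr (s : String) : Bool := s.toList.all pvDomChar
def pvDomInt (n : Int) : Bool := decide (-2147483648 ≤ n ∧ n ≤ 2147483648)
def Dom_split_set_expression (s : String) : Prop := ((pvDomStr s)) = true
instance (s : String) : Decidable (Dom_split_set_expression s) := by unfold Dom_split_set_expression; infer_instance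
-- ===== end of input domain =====

-- B replaces A's two char-by-char quote-state scans by a jump-based search (find the
-- earliest of target/quote, skip quoted runs wholesale to the matching close quote);
-- same return value; both raise ValueError on the same inputs (excluded by Pre_).

-- ===== PORT A =====
-- A's two while-loops are the same loop body with a different target character ('=' then '#');
-- ported as one recursive helper parametrised by that character, applied twice like A does.
def aScan (c : Char) : List Char → Nat → Bool → Bool → Option Nat
  | [], _, _, _ => none
  | ch :: rest, i, in_dq, in_sq =>
    if ch == '"' && !in_sq then aScan c rest (i + 1) (!in_dq) in_sq
    else if ch == '\'' && !in_dq then aScan c rest (i + 1) in_dq (!in_sq)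
    else if ch == c && !in_dq && !in_sq then some i
    else aScan c rest (i + 1) in_dq in_sq

def split_set_expression (s : String) : String × String × Option String :=
  let cs := s.toList
  match aScan '=' cs 0 false false with
  | none => ("", "", none)  -- raise ValueError "missing '='" : outside Pre_
  | some e =>
    let path := PySem.Chars.strip (cs.take e)          -- s[:eq_pos].strip()
    let rhs := PySem.Chars.strip (cs.drop (e + 1))     -- s[eq_pos+1:].strip()
    if path = [] then ("", "", none)  -- raise ValueError "empty path" : outside Pre_
    else
      match aScan '#' rhs 0 false false with
      | some h =>
        let value_src := PySem.Chars.rstrip (rhs.take h)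
        let comment := PySem.Chars.strip (rhs.drop (h + 1))
        if value_src = [] then ("", "", none)  -- raise ValueError "empty value" : outside Pre_
        else (String.ofList path, String.ofList value_src, some (String.ofList comment))
      | none =>
        if rhs = [] then ("", "", none)  -- raise ValueError "empty value" : outside Pre_
        else (String.ofList path, String.ofList rhs, none)

-- ===== PORT B =====
-- s.find(c, i) for a single character c; Python's -1 sentinel ported as none.
-- Exact on this use: a start past len(s) drops to [] and yields none, like CPython's -1.
def pyFindFrom (cs : List Char) (c : Char) (i : Nat) : Option Nat :=
  ((cs.drop i).idxOf? c).map (· + i)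

-- facts needed by bFind's termination argument (cited in decreasing_by)
theorem pyFindFrom_bounds (cs : List Char) (c : Char) (i j : Nat)
    (h : pyFindFrom cs c i = some j) : i ≤ j ∧ j < cs.length := by
  unfold pyFindFrom at h
  obtain ⟨k, hk, rfl⟩ := Option.map_eq_some_iff.mp h
  obtain ⟨hlt, -, -⟩ := List.idxOf?_eq_some_iff.mp hk
  rw [List.length_drop] at hlt
  omega

theorem min3_bounds (cs : List Char) (t : Char) (base j : Nat)
    (hm : ([pyFindFrom cs t base, pyFindFrom cs '"' base, pyFindFrom cs '\'' base].filterMap id).min? = some j) :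
    base ≤ j ∧ j < cs.length := by
  have hmem := (List.min?_eq_some_iff.mp hm).1
  simp only [List.mem_filterMap, id_eq, List.mem_cons, List.not_mem_nil, or_false] at hmem
  obtain ⟨o, ho, rfl⟩ := hmem
  rcases ho with h | h | h <;> exact pyFindFrom_bounds _ _ _ _ h.symm

-- Source B's jump loop: min of the three finds, return on target, else skip past the close quote.
def bFind (target : Char) (cs : List Char) (base : Nat) : Option Nat :=
  match hm : ([pyFindFrom cs target base, pyFindFrom cs '"' base, pyFindFrom cs '\'' base].filterMap id).min? with
  | none => none
  | some j =>
    if cs.getD j ' ' == target then some j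
    else
      match hc : pyFindFrom cs (cs.getD j ' ') (j + 1) with
      | none => none
      | some close => bFind target cs (close + 1)
termination_by cs.length - base
decreasing_by
  obtain ⟨h1, h2⟩ := min3_bounds cs target base j hm
  obtain ⟨h3, h4⟩ := pyFindFrom_bounds cs _ (j + 1) close hc
  omega

def split_set_expression_alt (s : String) : String × String × Option String :=
  let cs := s.toList
  match bFind '=' cs 0 with
  | none => ("", "", none)  -- raise ValueError "missing '='" : outside Pre_
  | some e =>
    let path := PySem.Chars.strip (cs.take e)
    let rhs := PySem.Chars.strip (cs.drop (e + 1))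
    if path = [] then ("", "", none)  -- raise ValueError "empty path" : outside Pre_
    else
      let vc : List Char × Option (List Char) :=
        match bFind '#' rhs 0 with
        | none => (rhs, none)
        | some h => (PySem.Chars.strip (rhs.take h), some (PySem.Chars.strip (rhs.drop (h + 1))))
      if vc.1 = [] then ("", "", none)  -- raise ValueError "empty value" : outside Pre_
      else (String.ofList path, String.ofList vc.1, String.ofList <$> vc.2)

-- ===== PRECONDITION & SPEC =====
-- the quote state (in_dq, in_sq) after reading a list of characters
def pvQState (cs : List Char) (st : Bool × Bool) : Bool × Bool :=
  cs.foldl (fun st ch =>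
    if ch == '"' && !st.2 then (!st.1, st.2)
    else if ch == '\'' && !st.1 then (st.1, !st.2)
    else st) st

-- first position of character c that lies outside quotes
def pvFirstUnq (c : Char) (cs : List Char) : Option Nat :=
  (List.range cs.length).find? (fun i => cs.getD i ' ' == c && pvQState (cs.take i) (false, false) == (false, false))

-- Pre_ excludes exactly the inputs where A raises ValueError: no unquoted '=', an empty
-- (after strip) path before it, or an empty (after strip) TOML value after it.
def pvPreCheck (s : String) : Bool :=
  match pvFirstUnq '=' s.toList with
  | none => false
  | some e =>
    PySem.Chars.strip (s.toList.take e) ≠ [] &&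
    (match pvFirstUnq '#' (PySem.Chars.strip (s.toList.drop (e + 1))) with
     | some h => PySem.Chars.rstrip ((PySem.Chars.strip (s.toList.drop (e + 1))).take h) ≠ []
     | none => PySem.Chars.strip (s.toList.drop (e + 1)) ≠ [])
def Pre_split_set_expression (s : String) : Prop := pvPreCheck s = true
instance (s : String) : Decidable (Pre_split_set_expression s) := by unfold Pre_split_set_expression; infer_instance

def pvWitness_split_set_expression : String := "a = 1 # c"

def Spec_split_set_expression (s : String) (out : String × String × Option String) : Prop := out = split_set_expression_alt s
instance (s : String) (out : String × String × Option String) : Decidable (Spec_split_set_expression s out) := by unfold Spec_split_set_expression; infer_instance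

-- ===== CLAIM (what is proved, stated in full; the proofs are below) =====
def Claim_equal_split_set_expression : Prop := ∀ (s : String), Dom_split_set_expression s → Pre_split_set_expression s → Spec_split_set_expression s (split_set_expression s)

-- ===== LEMMAS AND PROOFS =====

-- the index argument of aScan only shifts the result
theorem aScan_succ (c : Char) (cs : List Char) (i : Nat) (dq sq : Bool) :
    aScan c cs (i + 1) dq sq = (aScan c cs i dq sq).map (· + 1) := by
  induction cs generalizing i dq sq with
  | nil => rfl
  | cons ch rest ih =>
    simp only [aScan]
    split_ifs <;> simp [ih]

theorem aScan_shift (c : Char) (cs : List Char) (i : Nat) (dq sq : Bool) :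
    aScan c cs i dq sq = (aScan c cs 0 dq sq).map (· + i) := by
  induction i with
  | zero => cases aScan c cs 0 dq sq <;> simp
  | succ n ih => rw [aScan_succ, ih]; cases aScan c cs 0 dq sq <;> simp; omega

-- a character list free of target/quote characters is scanned to `none` in any state
theorem aScan_notrig (c : Char) (cs : List Char)
    (h : ∀ ch ∈ cs, (ch == c) = false ∧ (ch == '"') = false ∧ (ch == '\'') = false)
    (i : Nat) (dq sq : Bool) : aScan c cs i dq sq = none := by
  induction cs generalizing i dq sq with
  | nil => rfl
  | cons ch rest ih =>
    obtain ⟨hc, hq, hq'⟩ := h ch List.mem_cons_self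
    simp only [aScan, hc, hq, hq', Bool.false_and, Bool.false_eq_true, if_false]
    exact ih (fun x hx => h x (List.mem_cons_of_mem _ hx)) _ _ _

-- a trigger-free prefix is skipped without changing the state
theorem aScan_skip (c : Char) (p v : List Char)
    (hp : ∀ ch ∈ p, (ch == c) = false ∧ (ch == '"') = false ∧ (ch == '\'') = false)
    (i : Nat) (dq sq : Bool) :
    aScan c (p ++ v) i dq sq = aScan c v (i + p.length) dq sq := by
  induction p generalizing i with
  | nil => simp
  | cons ch rest ih =>
    obtain ⟨hc, hq, hq'⟩ := hp ch List.mem_cons_self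
    simp only [List.cons_append, aScan, hc, hq, hq', Bool.false_and, Bool.false_eq_true, if_false]
    rw [ih (fun x hx => hp x (List.mem_cons_of_mem _ hx))]
    congr 1
    simp; omega

-- inside a double quote, only the closing '"' matters
theorem aScan_in_dq (c : Char) (v : List Char) (i : Nat) :
    aScan c v i true false =
      (match v.idxOf? '"' with
       | none => none
       | some k => aScan c (v.drop (k + 1)) (i + k + 1) false false) := by
  induction v generalizing i with
  | nil => rfl
  | cons ch rest ih =>
    by_cases hq : (ch == '"') = true
    · have : ch = '"' := by simpa using hq
      subst this
      simp [aScan, List.idxOf?_cons]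
    · rw [Bool.not_eq_true] at hq
      simp only [aScan, hq, Bool.and_self, Bool.not_true, Bool.and_false, Bool.false_and,
        Bool.false_eq_true, if_false, Bool.and_true, Bool.true_and]
      rw [ih]
      simp only [List.idxOf?_cons, hq, Bool.false_eq_true, if_false]
      cases h : rest.idxOf? '"' with
      | none => simp
      | some k =>
        simp only [Option.map_some, List.drop_succ_cons]
        congr 1
        omega

-- inside a single quote, only the closing '\'' matters
theorem aScan_in_sq (c : Char) (v : List Char) (i : Nat) :
    aScan c v i false true =
      (match v.idxOf? '\'' with
       | none => none
       | some k => aScan c (v.drop (k + 1)) (i + k + 1) false false) := by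
  induction v generalizing i with
  | nil => rfl
  | cons ch rest ih =>
    by_cases hq : (ch == '\'') = true
    · have : ch = '\'' := by simpa using hq
      subst this
      simp [aScan, List.idxOf?_cons]
    · rw [Bool.not_eq_true] at hq
      simp only [aScan, Bool.not_true, Bool.and_false, Bool.false_eq_true, if_false, hq,
        Bool.not_false, Bool.and_true]
      rw [ih]
      simp only [List.idxOf?_cons, hq, Bool.false_eq_true, if_false]
      cases h : rest.idxOf? '\'' with
      | none => simp
      | some k =>
        simp only [Option.map_some, List.drop_succ_cons]
        congr 1
        omega

theorem bFind_eq_aScan (t : Char) (ht : (t == '"') = false) (ht' : (t == '\'') = false) :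
    ∀ (n : Nat) (cs : List Char) (base : Nat), cs.length - base ≤ n →
      bFind t cs base = (aScan t (cs.drop base) 0 false false).map (· + base) := by
  intro n
  induction n with
  | zero =>
    intro cs base hn
    have hnil : cs.drop base = [] := by
      rw [List.drop_eq_nil_iff]; omega
    rw [bFind.eq_def]
    split
    · rw [hnil]; rfl
    · rename_i j hm
      exfalso
      obtain ⟨h1, h2⟩ := min3_bounds cs t base j hm
      omega
  | succ n ih =>
    intro cs base hn
    rw [bFind.eq_def]
    split
    · rename_i hm
      have hnil := List.min?_eq_none_iff.mp hm
      have hnone : ∀ c, c = t ∨ c = '"' ∨ c = '\'' → pyFindFrom cs c base = none := by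
        intro c hc
        cases h : pyFindFrom cs c base with
        | none => rfl
        | some x =>
          exfalso
          have hx : x ∈ ([pyFindFrom cs t base, pyFindFrom cs '"' base,
              pyFindFrom cs '\'' base].filterMap id) := by
            apply List.mem_filterMap.mpr
            refine ⟨pyFindFrom cs c base, ?_, h⟩
            rcases hc with rfl | rfl | rfl <;> simp
          rw [hnil] at hx
          simp at hx
      have hmem : ∀ ch ∈ cs.drop base,
          (ch == t) = false ∧ (ch == '"') = false ∧ (ch == '\'') = false := by
        intro ch hch
        have key : ∀ c, c = t ∨ c = '"' ∨ c = '\'' → ch = c → False := by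
          intro c hc hEq
          have h := hnone c hc
          unfold pyFindFrom at h
          rw [Option.map_eq_none_iff, List.idxOf?_eq_none_iff] at h
          exact h (hEq ▸ hch)
        refine ⟨?_, ?_, ?_⟩ <;> rw [beq_eq_false_iff_ne]
        · exact fun hEq => key t (Or.inl rfl) hEq
        · exact fun hEq => key '"' (Or.inr (Or.inl rfl)) hEq
        · exact fun hEq => key '\'' (Or.inr (Or.inr rfl)) hEq
      rw [aScan_notrig t _ hmem]
      rfl
    · rename_i j hm
      obtain ⟨hbj, hjl⟩ := min3_bounds cs t base j hm
      set u := cs.drop base with hu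
      have hul : u.length = cs.length - base := by rw [hu, List.length_drop]
      have hj0 : j - base < u.length := by omega
      have hch : cs.getD j ' ' = u[j - base] := by
        rw [List.getD_eq_getElem cs ' ' (by omega : j < cs.length)]
        have h1 : u[j - base]'hj0 = cs[base + (j - base)]'(by omega) := List.getElem_drop
        rw [h1]
        congr 1
        omega
      have hsome : ∃ c, (c = t ∨ c = '"' ∨ c = '\'') ∧ pyFindFrom cs c base = some j := by
        have hjmem := (List.min?_eq_some_iff.mp hm).1
        simp only [List.mem_filterMap, id_eq, List.mem_cons, List.not_mem_nil, or_false] at hjmem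
        obtain ⟨o, ho, rfl⟩ := hjmem
        rcases ho with h | h | h
        · exact ⟨t, Or.inl rfl, h.symm⟩
        · exact ⟨'"', Or.inr (Or.inl rfl), h.symm⟩
        · exact ⟨'\'', Or.inr (Or.inr rfl), h.symm⟩
      obtain ⟨c, hc, hpc⟩ := hsome
      have hidx : u.idxOf? c = some (j - base) := by
        unfold pyFindFrom at hpc
        rw [← hu] at hpc
        obtain ⟨k, hk, he⟩ := Option.map_eq_some_iff.mp hpc
        have hkj : k = j - base := by omega
        rwa [hkj] at hk
      obtain ⟨hlt', hgc, hminc⟩ := List.idxOf?_eq_some_iff.mp hidx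
      have hjle : ∀ c' k', (c' = t ∨ c' = '"' ∨ c' = '\'') →
          pyFindFrom cs c' base = some k' → j ≤ k' := by
        intro c' k' hc' hp
        apply (List.min?_eq_some_iff.mp hm).2
        apply List.mem_filterMap.mpr
        exact ⟨pyFindFrom cs c' base, by rcases hc' with rfl | rfl | rfl <;> simp, hp⟩
      have hpref : ∀ ch ∈ u.take (j - base),
          (ch == t) = false ∧ (ch == '"') = false ∧ (ch == '\'') = false := by
        intro ch hmemch
        obtain ⟨i, hi, hgi⟩ := List.mem_iff_getElem.mp hmemch
        have hil : i < j - base := by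
          rw [List.length_take] at hi; omega
        have hiu : i < u.length := by omega
        have hgi' : u[i] = ch := by rw [← hgi, List.getElem_take]
        have key : ∀ c2, (c2 = t ∨ c2 = '"' ∨ c2 = '\'') → ch = c2 → False := by
          intro c2 hc2 hEq
          have hgi2 : u[i] = c2 := by rw [hgi', hEq]
          have hne : u.idxOf? c2 ≠ none :=
            fun hnm => (List.idxOf?_eq_none_iff.mp hnm) (hgi2 ▸ List.getElem_mem hiu)
          obtain ⟨k, hk⟩ := Option.ne_none_iff_exists'.mp hne
          obtain ⟨hklt, hgk, hmink⟩ := List.idxOf?_eq_some_iff.mp hk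
          have hki : k ≤ i := by
            by_contra hgt
            exact (hmink i (by omega)) hgi2
          have hpf : pyFindFrom cs c2 base = some (k + base) := by
            unfold pyFindFrom
            rw [← hu, hk]
            rfl
          have := hjle c2 (k + base) hc2 hpf
          omega
        refine ⟨?_, ?_, ?_⟩ <;> rw [beq_eq_false_iff_ne]
        · exact fun hEq => key t (Or.inl rfl) hEq
        · exact fun hEq => key '"' (Or.inr (Or.inl rfl)) hEq
        · exact fun hEq => key '\'' (Or.inr (Or.inr rfl)) hEq
      have haScan : aScan t u 0 false false =
          aScan t (u[j - base] :: u.drop (j - base + 1)) (j - base) false false := by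
        conv_lhs => rw [show u = u.take (j - base) ++ (u[j - base] :: u.drop (j - base + 1)) by
          conv_lhs => rw [← List.take_append_drop (j - base) u]
          rw [List.drop_eq_getElem_cons hj0]]
        rw [aScan_skip t _ _ hpref]
        congr 1
        rw [List.length_take]
        omega
      have hw : cs.drop (j + 1) = u.drop (j - base + 1) := by
        rw [hu, List.drop_drop]
        congr 1
        omega
      by_cases hif : (cs.getD j ' ' == t) = true
      · rw [if_pos hif, haScan]
        have hut : u[j - base] = t := by rw [← hch]; exact eq_of_beq hif
        rw [hut]
        simp only [aScan, ht, ht', Bool.false_and, Bool.false_eq_true, if_false,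
          BEq.rfl, Bool.not_false, Bool.and_true, Bool.true_and, if_true]
        rw [Option.map_some]
        congr 1
        omega
      · rw [if_neg hif]
        rw [Bool.not_eq_true] at hif
        have hcq : c = '"' ∨ c = '\'' := by
          rcases hc with rfl | rfl | rfl
          · rw [hch, hgc] at hif; simp at hif
          · exact Or.inl rfl
          · exact Or.inr rfl
        rw [haScan, hgc]
        have hihcall : ∀ (b2 : Nat), base < b2 → bFind t cs b2 =
            (aScan t (cs.drop b2) 0 false false).map (· + b2) := by
          intro b2 hb2
          exact ih cs b2 (by omega)
        rcases hcq with rfl | rfl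
        · -- double quote
          have hgd : cs.getD j ' ' = '"' := by rw [hch, hgc]
          have hpf : pyFindFrom cs '"' (j + 1) = (((u.drop (j - base + 1)).idxOf? '"')).map (· + (j + 1)) := by
            unfold pyFindFrom
            rw [hw]
          simp only [aScan, BEq.rfl, Bool.not_false, Bool.and_true, if_true]
          rw [aScan_in_dq]
          split
          · rename_i hnone
            rw [hgd, hpf] at hnone
            rw [Option.map_eq_none_iff] at hnone
            rw [hnone]
            rfl
          · rename_i close hclose
            rw [hgd, hpf] at hclose
            obtain ⟨k, hk, hke⟩ := Option.map_eq_some_iff.mp hclose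
            rw [hk]
            dsimp only
            rw [hihcall (close + 1) (by omega)]
            have hdd : cs.drop (close + 1) = (u.drop (j - base + 1)).drop (k + 1) := by
              rw [hu, List.drop_drop, List.drop_drop]
              congr 1
              omega
            rw [hdd, aScan_shift t _ (j - base + 1 + k + 1)]
            cases aScan t ((u.drop (j - base + 1)).drop (k + 1)) 0 false false with
            | none => rfl
            | some r =>
              simp only [Option.map_some]
              congr 1
              omega
        · -- single quote
          have hgd : cs.getD j ' ' = '\'' := by rw [hch, hgc]
          have hpf : pyFindFrom cs '\'' (j + 1) = (((u.drop (j - base + 1)).idxOf? '\'')).map (· + (j + 1)) := by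
            unfold pyFindFrom
            rw [hw]
          have hqq : ('\'' == '"') = false := by decide
          simp only [aScan, hqq, Bool.false_and, Bool.false_eq_true, if_false,
            BEq.rfl, Bool.not_false, Bool.and_true, if_true]
          rw [aScan_in_sq]
          split
          · rename_i hnone
            rw [hgd, hpf] at hnone
            rw [Option.map_eq_none_iff] at hnone
            rw [hnone]
            rfl
          · rename_i close hclose
            rw [hgd, hpf] at hclose
            obtain ⟨k, hk, hke⟩ := Option.map_eq_some_iff.mp hclose
            rw [hk]
            dsimp only
            rw [hihcall (close + 1) (by omega)]
            have hdd : cs.drop (close + 1) = (u.drop (j - base + 1)).drop (k + 1) := by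
              rw [hu, List.drop_drop, List.drop_drop]
              congr 1
              omega
            rw [hdd, aScan_shift t _ (j - base + 1 + k + 1)]
            cases aScan t ((u.drop (j - base + 1)).drop (k + 1)) 0 false false with
            | none => rfl
            | some r =>
              simp only [Option.map_some]
              congr 1
              omega

-- lstrip / strip bookkeeping
theorem rstrip_decomp (u : List Char) :
    PySem.Chars.rstrip u ++ (u.reverse.takeWhile PySem.Chars.isspace).reverse = u := by
  simp only [PySem.Chars.rstrip]
  rw [← List.reverse_append, List.takeWhile_append_dropWhile, List.reverse_reverse]

theorem lstrip_take_strip (t : List Char) (r : Nat) :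
    PySem.Chars.lstrip ((PySem.Chars.strip t).take r) = (PySem.Chars.strip t).take r := by
  cases hm : (PySem.Chars.strip t).take r with
  | nil => simp [PySem.Chars.lstrip]
  | cons a l =>
    have hmem : PySem.Chars.strip t ≠ [] := by
      intro hnil; rw [hnil] at hm; simp at hm
    have hhead : ∃ m', PySem.Chars.strip t = a :: m' := by
      cases hs : PySem.Chars.strip t with
      | nil => exact absurd hs hmem
      | cons b m' =>
        cases r with
        | zero => rw [hs] at hm; simp at hm
        | succ r' =>
          rw [hs, List.take_succ_cons] at hm
          have hba : b = a := (List.cons_eq_cons.mp hm).1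
          exact ⟨m', congrArg (· :: m') hba⟩
    obtain ⟨m', hs⟩ := hhead
    have hu : PySem.Chars.strip t ++ ((PySem.Chars.lstrip t).reverse.takeWhile PySem.Chars.isspace).reverse
        = List.dropWhile PySem.Chars.isspace t := by
      have := rstrip_decomp (PySem.Chars.lstrip t)
      simpa [PySem.Chars.strip, PySem.Chars.lstrip] using this
    have hne : List.dropWhile PySem.Chars.isspace t ≠ [] := by
      intro hnil
      rw [hs] at hu; simp [hnil] at hu
    have hsp : PySem.Chars.isspace a = false := by
      have h1 := List.head_dropWhile_not PySem.Chars.isspace hne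
      have h2 : (List.dropWhile PySem.Chars.isspace t).head? = some a := by
        rw [← hu, hs]; rfl
      rw [List.head?_eq_some_head hne] at h2
      rwa [Option.some.inj h2] at h1
    simp [PySem.Chars.lstrip, hsp]

-- A's scan computes the first unquoted occurrence (the form Pre_ is stated in)
theorem find?_congr' {α : Type} (l : List α) (p q : α → Bool) (h : ∀ x ∈ l, p x = q x) :
    l.find? p = l.find? q := by
  induction l with
  | nil => rfl
  | cons a as ih =>
    simp only [List.find?_cons, h a List.mem_cons_self]
    cases q a
    · exact ih (fun x hx => h x (List.mem_cons_of_mem _ hx))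
    · rfl

theorem beq_prod_false_false (dq sq : Bool) : ((dq, sq) == (false, false)) = (!dq && !sq) := by
  cases dq <;> cases sq <;> rfl

theorem aScan_eq_firstUnq (c : Char) (hq : (c == '"') = false) (hq' : (c == '\'') = false)
    (cs : List Char) (dq sq : Bool) :
    aScan c cs 0 dq sq =
      (List.range cs.length).find?
        (fun i => cs.getD i ' ' == c && pvQState (cs.take i) (dq, sq) == (false, false)) := by
  induction cs generalizing dq sq with
  | nil => rfl
  | cons ch rest ih =>
    have hmap :
        (List.range rest.length).find?
            ((fun i => (ch :: rest).getD i ' ' == c &&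
              pvQState ((ch :: rest).take i) (dq, sq) == (false, false)) ∘ Nat.succ) =
          (List.range rest.length).find?
            (fun i => rest.getD i ' ' == c &&
              pvQState (rest.take i)
                (if ch == '"' && !sq then (!dq, sq)
                 else if ch == '\'' && !dq then (dq, !sq) else (dq, sq)) == (false, false)) := by
      apply find?_congr'
      intro i _
      simp only [Function.comp_apply, List.getD_cons_succ, List.take_succ_cons]
      rfl
    rw [List.length_cons, List.range_succ_eq_map, List.find?_cons]
    rw [List.find?_map, hmap]
    simp only [List.getD_cons_zero, List.take_zero,
      show pvQState ([] : List Char) (dq, sq) = (dq, sq) from rfl, beq_prod_false_false]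
    by_cases h1 : (ch == '"' && !sq) = true
    · have hch : (ch == c) = false := by
        have : ch = '"' := by simpa using (Bool.and_eq_true_iff.mp h1).1
        subst this
        simpa [BEq.comm] using hq
      simp only [hch, Bool.false_and]
      simp only [aScan, h1, if_true]
      rw [aScan_succ, ih]
    · rw [Bool.not_eq_true] at h1
      by_cases h2 : (ch == '\'' && !dq) = true
      · have hch : (ch == c) = false := by
          have : ch = '\'' := by simpa using (Bool.and_eq_true_iff.mp h2).1
          subst this
          simpa [BEq.comm] using hq'
        simp only [hch, Bool.false_and]
        simp only [aScan, h1, h2, Bool.false_eq_true, if_false, if_true]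
        rw [aScan_succ, ih]
      · rw [Bool.not_eq_true] at h2
        by_cases h3 : (ch == c && !dq && !sq) = true
        · have hp0 : (ch == c && (!dq && !sq)) = true := by rwa [← Bool.and_assoc]
          simp only [hp0]
          simp only [aScan, h1, h2, h3, Bool.false_eq_true, if_false, if_true]
        · rw [Bool.not_eq_true] at h3
          have hp0 : (ch == c && (!dq && !sq)) = false := by rwa [← Bool.and_assoc]
          simp only [hp0]
          simp only [aScan, h1, h2, h3, Bool.false_eq_true, if_false]
          rw [aScan_succ, ih]

theorem firstUnq_eq_aScan (c : Char) (hq : (c == '"') = false) (hq' : (c == '\'') = false)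
    (cs : List Char) : pvFirstUnq c cs = aScan c cs 0 false false :=
  (aScan_eq_firstUnq c hq hq' cs false false).symm

-- ===== VERDICT (by name: the statement is the Claim_ definition above) =====
theorem bFind_total (t : Char) (ht : (t == '"') = false) (ht' : (t == '\'') = false)
    (cs : List Char) : bFind t cs 0 = aScan t cs 0 false false := by
  rw [bFind_eq_aScan t ht ht' cs.length cs 0 (by omega), List.drop_zero]
  cases aScan t cs 0 false false <;> simp

theorem split_set_expression_spec : Claim_equal_split_set_expression := by
  intro s _ hpre
  unfold Spec_split_set_expression split_set_expression split_set_expression_alt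
  dsimp only
  unfold Pre_split_set_expression pvPreCheck at hpre
  rw [firstUnq_eq_aScan '=' (by decide) (by decide)] at hpre
  rw [bFind_total '=' (by decide) (by decide)]
  cases he : aScan '=' s.toList 0 false false with
  | none => rw [he] at hpre
  | some e =>
    rw [he] at hpre
    dsimp only at hpre ⊢
    simp only [Bool.and_eq_true, decide_eq_true_eq] at hpre
    obtain ⟨hpath, hval⟩ := hpre
    rw [if_neg hpath, if_neg hpath]
    rw [bFind_total '#' (by decide) (by decide)]
    rw [firstUnq_eq_aScan '#' (by decide) (by decide)] at hval
    cases hh : aScan '#' (PySem.Chars.strip (s.toList.drop (e + 1))) 0 false false with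
    | none =>
      rw [hh] at hval
      simp only [decide_eq_true_eq] at hval
      rw [if_neg hval]
      dsimp only
      rw [if_neg hval]
      rfl
    | some h =>
      rw [hh] at hval
      simp only [decide_eq_true_eq] at hval
      have hvs : PySem.Chars.strip ((PySem.Chars.strip (s.toList.drop (e + 1))).take h) =
          PySem.Chars.rstrip ((PySem.Chars.strip (s.toList.drop (e + 1))).take h) := by
        show PySem.Chars.rstrip (PySem.Chars.lstrip _) = _
        rw [lstrip_take_strip]
      dsimp only
      simp only [hvs]
      rw [if_neg hval, if_neg hval]
      rfl
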